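-- pv_equiv track=rewrite | github.com/aniketk33/LeetcodeSolutions | ibm-oa-24th-sept.py | count_operations
-- ===== SOURCE A (Python) =====
-- from heapq import heapify, heappop, heappush
--
-- def count_operations(computation_time):
--     # create a max heap of unique time
--     unique_nums = set(computation_time)
--     max_heap = [-t for t in unique_nums]
--     heapify(max_heap)
--
--     count = 0
--
--     while len(max_heap) > 0:
--         val = -1 * heappop(max_heap)
--         # only perform operation on even values
--         if val % 2 == 0:
--             count += 1
--             val = val // 2
--             if val not in unique_nums and val % 2 != 0:
--                 unique_nums.add(val)
--                 heappush(max_heap, -val)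
--
--     return count
-- ===== SOURCE B (Python) =====
-- def count_operations(computation_time):
--     return len({x for x in computation_time if x % 2 == 0})
-- ===== Notes on version B (the rewrite author's own statement) =====
-- stated objective: simpler
-- what changed: B replaces the heap, the halve-and-push loop and the auxiliary set with a single pass building the set of even values (the pushed halves are always odd and can never be counted), returning its size.
import Mathlib
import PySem

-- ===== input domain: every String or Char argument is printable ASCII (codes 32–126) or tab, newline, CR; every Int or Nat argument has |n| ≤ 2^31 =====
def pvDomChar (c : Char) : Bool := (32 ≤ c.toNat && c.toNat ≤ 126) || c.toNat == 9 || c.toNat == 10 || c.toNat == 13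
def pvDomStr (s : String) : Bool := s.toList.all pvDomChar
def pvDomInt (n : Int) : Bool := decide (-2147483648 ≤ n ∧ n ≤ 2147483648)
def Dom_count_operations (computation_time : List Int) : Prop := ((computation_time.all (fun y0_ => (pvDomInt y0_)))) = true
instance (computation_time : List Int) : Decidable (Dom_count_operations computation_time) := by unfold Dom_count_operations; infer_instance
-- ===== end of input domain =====

-- B drops A's max-heap and halve-and-push loop (whose pushed halves are always odd and never
-- counted) and simply returns the size of the set of even input values: simpler, one pass.


-- ===== PORT A =====
-- two arithmetic/counting facts the loop's termination proof cites by name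
theorem pv_mod2_neg (m : Int) : PySem.Int.mod (-m) 2 = 0 ↔ PySem.Int.mod m 2 = 0 := by
  rw [PySem.Int.mod_eq_zero_iff_dvd, PySem.Int.mod_eq_zero_iff_dvd]
  constructor <;> intro h <;> omega

theorem pv_countP_erase (l : List Int) (m : Int) (p : Int → Bool) (h : m ∈ l) :
    l.countP p = (l.erase m).countP p + (if p m then 1 else 0) := by
  induction l with
  | nil => cases h
  | cons a t ih =>
    by_cases hm : a = m
    · subst hm; simp [List.countP_cons]
    · rw [List.erase_cons_tail (by simp [hm])]
      have hmt : m ∈ t := by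
        cases h with
        | head => exact absurd rfl hm
        | tail _ h => exact h
      simp only [List.countP_cons, ih hmt]; split_ifs <;> omega

-- A's while loop over the heap; heappop is modelled as min-extraction (heapify and
-- heappush/heappop maintain exactly the multiset, and each pop returns its minimum),
-- heappush as insertion
def pvLoopA (heap : List Int) (uniq : PySem.Set Int) (count : Int) : Int :=
  match hmin : PySem.List.min? heap (fun x => x) with
  | none => count                                        -- len(max_heap) == 0: loop exits
  | some m =>
    let heap1 := heap.erase m                            -- heappop removes the minimum
    let val := -1 * m
    if PySem.Int.mod val 2 == 0 then
      let val1 := PySem.Int.floordiv val 2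
      if !(PySem.Set.contains uniq val1) && (PySem.Int.mod val1 2 != 0) then
        pvLoopA (heap1 ++ [-val1]) (PySem.Set.add uniq val1) (count + 1)
      else
        pvLoopA heap1 uniq (count + 1)
    else
      pvLoopA heap1 uniq count
termination_by heap.length + heap.countP (fun x => PySem.Int.mod x 2 == 0)
decreasing_by
  all_goals
    have hmem : m ∈ heap := PySem.List.min?_mem hmin
    have hlen := List.length_erase_of_mem hmem
    have hpos : 1 ≤ heap.length := List.length_pos_of_mem hmem
  · rename_i hval hpush
    have hmE : PySem.Int.mod m 2 = 0 :=
      (pv_mod2_neg m).1 (by rw [← neg_one_mul]; exact eq_of_beq hval)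
    have hcnt : heap.countP (fun x => PySem.Int.mod x 2 == 0)
        = (heap.erase m).countP (fun x => PySem.Int.mod x 2 == 0) + 1 := by
      rw [pv_countP_erase heap m _ hmem, if_pos (by simpa using hmE)]
    have hodd : ((-(PySem.Int.floordiv (-1 * m) 2) :: ([] : List Int)).countP
        (fun x => PySem.Int.mod x 2 == 0)) = 0 := by
      simp only [Bool.and_eq_true, bne_iff_ne, ne_eq] at hpush
      simp only [List.countP_cons, List.countP_nil]
      rw [if_neg]
      simp only [beq_iff_eq]
      exact fun hc => hpush.2 ((pv_mod2_neg _).1 hc)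
    rw [List.length_append, List.countP_append, hodd, hlen, hcnt]
    simp only [List.length_cons, List.length_nil]
    omega
  · rename_i hval _hpush
    have hmE : PySem.Int.mod m 2 = 0 :=
      (pv_mod2_neg m).1 (by rw [← neg_one_mul]; exact eq_of_beq hval)
    have hcnt : heap.countP (fun x => PySem.Int.mod x 2 == 0)
        = (heap.erase m).countP (fun x => PySem.Int.mod x 2 == 0) + 1 := by
      rw [pv_countP_erase heap m _ hmem, if_pos (by simpa using hmE)]
    omega
  · rename_i hval
    have hmO : ¬ PySem.Int.mod m 2 = 0 := fun hc =>
      hval (beq_iff_eq.mpr (show PySem.Int.mod (-1 * m) 2 = 0 by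
        rw [neg_one_mul]; exact (pv_mod2_neg m).2 hc))
    have hcnt : heap.countP (fun x => PySem.Int.mod x 2 == 0)
        = (heap.erase m).countP (fun x => PySem.Int.mod x 2 == 0) := by
      rw [pv_countP_erase heap m _ hmem, if_neg (by simpa using hmO)]; simp
    omega

def count_operations (computation_time : List Int) : Int :=
  let unique_nums : PySem.Set Int := PySem.Set.ofList computation_time
  let max_heap := unique_nums.map (fun t => -t)          -- [-t for t in unique_nums]
  pvLoopA max_heap unique_nums 0

-- ===== PORT B =====
def count_operations_alt (computation_time : List Int) : Int :=
  ((PySem.Set.ofList (computation_time.filter (fun x => PySem.Int.mod x 2 == 0))).length : Int)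

-- ===== PRECONDITION & SPEC =====
def Spec_count_operations (computation_time : List Int) (out : Int) : Prop := out = count_operations_alt computation_time
instance (computation_time : List Int) (out : Int) : Decidable (Spec_count_operations computation_time out) := by unfold Spec_count_operations; infer_instance

-- ===== CLAIM (what is proved, stated in full; the proofs are below) =====
def Claim_equal_count_operations : Prop := ∀ (computation_time : List Int), Dom_count_operations computation_time → Spec_count_operations computation_time (count_operations computation_time)

-- ===== LEMMAS AND PROOFS =====
-- the loop returns count plus the number of even values remaining in the heap
theorem pvLoopA_eq (heap : List Int) (uniq : PySem.Set Int) (count : Int) :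
    pvLoopA heap uniq count = count + (heap.countP (fun x => PySem.Int.mod x 2 == 0) : Int) := by
  induction heap, uniq, count using pvLoopA.induct with
  | case1 heap uniq count hmin =>
    rw [pvLoopA]
    split
    · simp [(PySem.List.min?_eq_none_iff heap _).1 hmin]
    · rename_i m1 hsome; rw [hmin] at hsome; cases hsome
  | case2 heap uniq count m hmin _heap1 _val hval _val1 hpush ih =>
    have hval' : (PySem.Int.mod (-1 * m) 2 == 0) = true := hval
    have hpush' : (!(PySem.Set.contains uniq (PySem.Int.floordiv (-1 * m) 2))
        && (PySem.Int.mod (PySem.Int.floordiv (-1 * m) 2) 2 != 0)) = true := hpush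
    have ih' : pvLoopA (heap.erase m ++ [-(PySem.Int.floordiv (-1 * m) 2)])
          (PySem.Set.add uniq (PySem.Int.floordiv (-1 * m) 2)) (count + 1)
        = count + 1 + (((heap.erase m ++ [-(PySem.Int.floordiv (-1 * m) 2)]).countP
            (fun x => PySem.Int.mod x 2 == 0) : Nat) : Int) := ih
    have hmem : m ∈ heap := PySem.List.min?_mem hmin
    have hmE : PySem.Int.mod m 2 = 0 :=
      (pv_mod2_neg m).1 (by rw [← neg_one_mul]; exact eq_of_beq hval')
    have hcnt : heap.countP (fun x => PySem.Int.mod x 2 == 0)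
        = (heap.erase m).countP (fun x => PySem.Int.mod x 2 == 0) + 1 := by
      rw [pv_countP_erase heap m _ hmem, if_pos (by simpa using hmE)]
    have hodd : ((-(PySem.Int.floordiv (-1 * m) 2) :: ([] : List Int)).countP
        (fun x => PySem.Int.mod x 2 == 0)) = 0 := by
      simp only [Bool.and_eq_true, bne_iff_ne, ne_eq] at hpush'
      simp only [List.countP_cons, List.countP_nil]
      rw [if_neg]
      simp only [beq_iff_eq]
      exact fun hc => hpush'.2 ((pv_mod2_neg _).1 hc)
    rw [pvLoopA]
    split
    · rename_i hnone; simp [hmin] at hnone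
    · rename_i m1 hsome
      rw [hmin] at hsome; injection hsome with hm; subst hm
      rw [if_pos hval', if_pos hpush', ih', List.countP_append, hodd, hcnt]
      push_cast
      ring
  | case3 heap uniq count m hmin _heap1 _val hval _val1 hpush ih =>
    have hval' : (PySem.Int.mod (-1 * m) 2 == 0) = true := hval
    have hpush' : ¬ (!(PySem.Set.contains uniq (PySem.Int.floordiv (-1 * m) 2))
        && (PySem.Int.mod (PySem.Int.floordiv (-1 * m) 2) 2 != 0)) = true := hpush
    have ih' : pvLoopA (heap.erase m) uniq (count + 1)
        = count + 1 + (((heap.erase m).countP (fun x => PySem.Int.mod x 2 == 0) : Nat) : Int) := ih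
    have hmem : m ∈ heap := PySem.List.min?_mem hmin
    have hmE : PySem.Int.mod m 2 = 0 :=
      (pv_mod2_neg m).1 (by rw [← neg_one_mul]; exact eq_of_beq hval')
    have hcnt : heap.countP (fun x => PySem.Int.mod x 2 == 0)
        = (heap.erase m).countP (fun x => PySem.Int.mod x 2 == 0) + 1 := by
      rw [pv_countP_erase heap m _ hmem, if_pos (by simpa using hmE)]
    rw [pvLoopA]
    split
    · rename_i hnone; simp [hmin] at hnone
    · rename_i m1 hsome
      rw [hmin] at hsome; injection hsome with hm; subst hm
      rw [if_pos hval', if_neg hpush', ih', hcnt]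
      push_cast
      ring
  | case4 heap uniq count m hmin _heap1 _val hval ih =>
    have hval' : ¬ (PySem.Int.mod (-1 * m) 2 == 0) = true := hval
    have ih' : pvLoopA (heap.erase m) uniq count
        = count + (((heap.erase m).countP (fun x => PySem.Int.mod x 2 == 0) : Nat) : Int) := ih
    have hmem : m ∈ heap := PySem.List.min?_mem hmin
    have hmO : ¬ PySem.Int.mod m 2 = 0 := fun hc =>
      hval' (beq_iff_eq.mpr (show PySem.Int.mod (-1 * m) 2 = 0 by
        rw [neg_one_mul]; exact (pv_mod2_neg m).2 hc))
    have hcnt : heap.countP (fun x => PySem.Int.mod x 2 == 0)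
        = (heap.erase m).countP (fun x => PySem.Int.mod x 2 == 0) := by
      rw [pv_countP_erase heap m _ hmem, if_neg (by simpa using hmO)]; simp
    rw [pvLoopA]
    split
    · rename_i hnone; simp [hmin] at hnone
    · rename_i m1 hsome
      rw [hmin] at hsome; injection hsome with hm; subst hm
      rw [if_neg hval', ih', hcnt]

-- Set.add commutes with List.filter
theorem pv_filter_add (p : Int → Bool) (s : PySem.Set Int) (a : Int) :
    (PySem.Set.add s a).filter p =
      if p a then PySem.Set.add (s.filter p) a else s.filter p := by
  by_cases hmem : a ∈ s
  · by_cases hp : p a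
    · have h2 : a ∈ s.filter p := List.mem_filter.2 ⟨hmem, hp⟩
      simp [PySem.Set.add, PySem.Set.contains, hmem, hp, h2]
    · simp [PySem.Set.add, PySem.Set.contains, hmem, hp]
  · by_cases hp : p a
    · have h2 : a ∉ s.filter p := fun hc => hmem (List.mem_filter.1 hc).1
      simp [PySem.Set.add, PySem.Set.contains, hmem, hp, h2, List.filter_append]
    · simp [PySem.Set.add, PySem.Set.contains, hmem, hp, List.filter_append]

theorem pv_filter_foldl_add (p : Int → Bool) (l : List Int) (s : PySem.Set Int) :
    (l.foldl PySem.Set.add s).filter p = (l.filter p).foldl PySem.Set.add (s.filter p) := by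
  induction l generalizing s with
  | nil => rfl
  | cons a t ih =>
    simp only [List.foldl_cons, List.filter_cons, ih]
    rw [pv_filter_add]
    split_ifs <;> rfl

-- distinct evens of l = distinct elements of the evens of l
theorem pv_countP_ofList (p : Int → Bool) (l : List Int) :
    (PySem.Set.ofList l).countP p = (PySem.Set.ofList (l.filter p)).length := by
  rw [PySem.Set.ofList_eq_foldl, PySem.Set.ofList_eq_foldl, List.countP_eq_length_filter,
    pv_filter_foldl_add]
  rfl

-- ===== VERDICT (by name: the statement is the Claim_ definition above) =====
theorem count_operations_spec : Claim_equal_count_operations := by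
  intro l _
  unfold Spec_count_operations count_operations count_operations_alt
  rw [pvLoopA_eq]
  have hmap : ((PySem.Set.ofList l).map (fun t => -t)).countP (fun x => PySem.Int.mod x 2 == 0)
      = (PySem.Set.ofList l).countP (fun x => PySem.Int.mod x 2 == 0) := by
    rw [List.countP_map]
    exact List.countP_congr (fun x _ => by
      simp only [Function.comp_apply, beq_iff_eq]
      exact pv_mod2_neg x)
  simp only [hmap, pv_countP_ofList]
  omega
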